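-- pv_equiv track=rewrite | github.com/pc5401/my_BOJ | 백준/Silver/10655. 마라톤 1/마라톤 1.py | solve
-- ===== SOURCE A (Python) =====
-- def manhattan_distance(point1, point2):
--     return abs(point1[0] - point2[0]) + abs(point1[1] - point2[1])
--
-- def solve(n, points):
--     # 전체 경로의 기본 거리 계산
--     total_distance = sum(manhattan_distance(points[i], points[i+1]) for i in range(n-1))
--
--     # 건너뛰기로 인해 절약할 수 있는 최대 거리
--     max_save = 0
--
--     for i in range(1, n-1):
--         distance_without_skip = manhattan_distance(points[i-1], points[i]) + manhattan_distance(points[i], points[i+1])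
--         distance_with_skip = manhattan_distance(points[i-1], points[i+1])
--         save = distance_without_skip - distance_with_skip
--         max_save = max(max_save, save)
--
--     # 최소 거리는 전체 거리에서 절약할 수 있는 최대 거리를 뺀 것
--     return total_distance - max_save
-- ===== SOURCE B (Python) =====
-- def manhattan_distance(point1, point2):
--     return abs(point1[0] - point2[0]) + abs(point1[1] - point2[1])
--
-- def walk_length(n, points, skip):
--     # simulate running the whole course, omitting checkpoint `skip` (None = omit nothing)
--     total = 0
--     prev = None
--     for j in range(n):
--         if j == skip:
--             continue
--         if prev is not None:
--             total += manhattan_distance(points[prev], points[j])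
--         prev = j
--     return total
--
-- def solve(n, points):
--     # brute force: re-simulate the full walk once per candidate skipped checkpoint
--     return min(walk_length(n, points, skip) for skip in [None] + list(range(1, n - 1)))
-- ===== Notes on version B (the rewrite author's own statement) =====
-- stated objective: alternative
-- what changed: B is a brute-force search: for each candidate skipped checkpoint (including skipping none) it re-simulates the entire walk from scratch with a prev/total state machine and takes the minimum of the walk lengths, instead of A's single pass that subtracts the best local saving from a precomputed total.
import Mathlib
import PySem

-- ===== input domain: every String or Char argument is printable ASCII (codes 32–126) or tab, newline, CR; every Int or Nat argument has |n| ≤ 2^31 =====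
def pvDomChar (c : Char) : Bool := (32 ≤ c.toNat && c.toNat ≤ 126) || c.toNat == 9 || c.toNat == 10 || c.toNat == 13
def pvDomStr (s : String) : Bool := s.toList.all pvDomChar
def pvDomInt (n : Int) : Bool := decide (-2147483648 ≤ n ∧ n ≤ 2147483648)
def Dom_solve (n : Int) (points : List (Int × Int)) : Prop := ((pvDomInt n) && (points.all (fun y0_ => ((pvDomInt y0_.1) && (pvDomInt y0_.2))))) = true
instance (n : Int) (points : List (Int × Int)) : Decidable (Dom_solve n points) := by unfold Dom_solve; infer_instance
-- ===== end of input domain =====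

-- B is a brute-force search: it re-simulates the whole walk once per candidate skipped
-- checkpoint and takes the minimum, instead of A's single pass subtracting the best saving.


-- ===== PORT A =====
def pvMd (p q : Int × Int) : Int := |p.1 - q.1| + |p.2 - q.2|

def pvPt (points : List (Int × Int)) (i : Int) : Int × Int := PySem.List.pyGetD points i (0, 0)

def solve (n : Int) (points : List (Int × Int)) : Int :=
  let total := ((PySem.List.pyRange 0 (n - 1) 1).map
    (fun i => pvMd (pvPt points i) (pvPt points (i + 1)))).sum
  let maxSave := (PySem.List.pyRange 1 (n - 1) 1).foldl
    (fun ms i => max ms ((pvMd (pvPt points (i - 1)) (pvPt points i)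
        + pvMd (pvPt points i) (pvPt points (i + 1)))
      - pvMd (pvPt points (i - 1)) (pvPt points (i + 1)))) 0
  total - maxSave

-- ===== PORT B =====
-- one step of the walk simulation: state = (accumulated distance, previous index or none)
def pvStep (points : List (Int × Int)) (st : Int × Option Int) (j : Int) : Int × Option Int :=
  match st.2 with
  | none => (st.1, some j)
  | some p => (st.1 + pvMd (pvPt points p) (pvPt points j), some j)

-- walk_length: simulate the whole course, omitting checkpoint `skip` (none = omit nothing)
def pvWalk (n : Int) (points : List (Int × Int)) (skip : Option Int) : Int :=
  ((PySem.List.pyRange 0 n 1).foldl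
    (fun st j => if skip = some j then st else pvStep points st j)
    ((0 : Int), (none : Option Int))).1

def solve_alt (n : Int) (points : List (Int × Int)) : Int :=
  ((PySem.List.pyRange 1 (n - 1) 1).map some).foldl
    (fun best s => min best (pvWalk n points s)) (pvWalk n points none)

-- ===== PRECONDITION & SPEC =====
-- Pre_ excludes exactly the inputs on which A raises IndexError (n exceeds the number of
-- points while n ≥ 2, so points[n-1] is out of range); B raises there too.
def Pre_solve (n : Int) (points : List (Int × Int)) : Prop :=
  n ≤ (points.length : Int) ∨ n ≤ 1
instance (n : Int) (points : List (Int × Int)) : Decidable (Pre_solve n points) := by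
  unfold Pre_solve; infer_instance
def pvWitness_solve : Int × (List (Int × Int)) := (3, [(0, 0), (2, 1), (2, 5)])

def Spec_solve (n : Int) (points : List (Int × Int)) (out : Int) : Prop := out = solve_alt n points
instance (n : Int) (points : List (Int × Int)) (out : Int) : Decidable (Spec_solve n points out) := by unfold Spec_solve; infer_instance

-- ===== CLAIM (what is proved, stated in full; the proofs are below) =====
def Claim_equal_solve : Prop := ∀ (n : Int) (points : List (Int × Int)), Dom_solve n points → Pre_solve n points → Spec_solve n points (solve n points)

-- ===== LEMMAS AND PROOFS =====

-- distance between checkpoints j and k (proof-side shorthand)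
def pvDd (points : List (Int × Int)) (j k : Int) : Int := pvMd (pvPt points j) (pvPt points k)

-- total length of a walk that is at checkpoint p and still has to visit the indices in L
def pvAdj (points : List (Int × Int)) (p : Int) : List Int → Int
  | [] => 0
  | j :: t => pvDd points p j + pvAdj points j t

-- the skip-test inside the loop is a filter of the index list
theorem pv_fold_filter (points : List (Int × Int)) (skip : Option Int) :
    ∀ (L : List Int) (st : Int × Option Int),
      L.foldl (fun st j => if skip = some j then st else pvStep points st j) st
        = (L.filter (fun j => !decide (skip = some j))).foldl (pvStep points) st := by
  intro L
  induction L with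
  | nil => intro st; rfl
  | cons a t ih =>
    intro st
    by_cases h : skip = some a
    · subst h
      simpa [List.filter_cons] using ih st
    · simpa [List.filter_cons, h] using ih (pvStep points st a)

-- the fold from a started walk computes pvAdj
theorem pv_fold_adj (points : List (Int × Int)) :
    ∀ (L : List Int) (t p : Int),
      (L.foldl (pvStep points) (t, some p)).1 = t + pvAdj points p L := by
  intro L
  induction L with
  | nil => intro t p; simp [pvAdj]
  | cons a l ih => intro t p; simp [pvStep, pvAdj, ih, pvDd]; ring

-- a range strictly above i is untouched by the ≠ i filter
theorem pv_filter_range_id (i b : Int) :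
    ∀ (a : Int), i < a →
      (PySem.List.pyRange a b 1).filter (fun j => !decide ((some i : Option Int) = some j))
        = PySem.List.pyRange a b 1 := by
  have H : ∀ (k : Nat) (a : Int), (b - a).toNat = k → i < a →
      (PySem.List.pyRange a b 1).filter (fun j => !decide ((some i : Option Int) = some j))
        = PySem.List.pyRange a b 1 := by
    intro k
    induction k with
    | zero =>
      intro a hk _
      rw [PySem.List.pyRange_one_eq_nil (by omega)]; rfl
    | succ m ih =>
      intro a hk ha
      by_cases hab : a < b
      · rw [PySem.List.pyRange_one_cons hab]
        have : ¬ ((some i : Option Int) = some a) := by simp; omega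
        simp only [List.filter_cons, this, decide_false, Bool.not_false, if_true]
        rw [ih (a + 1) (by omega) (by omega)]
      · rw [PySem.List.pyRange_one_eq_nil (by omega)]; rfl
  intro a ha; exact H (b - a).toNat a rfl ha

-- filtering index i out of the range [a, b) splits it in two
theorem pv_filter_range_split (i b : Int) :
    ∀ (a : Int), a ≤ i → i < b →
      (PySem.List.pyRange a b 1).filter (fun j => !decide ((some i : Option Int) = some j))
        = PySem.List.pyRange a i 1 ++ PySem.List.pyRange (i + 1) b 1 := by
  have H : ∀ (k : Nat) (a : Int), (i - a).toNat = k → a ≤ i → i < b →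
      (PySem.List.pyRange a b 1).filter (fun j => !decide ((some i : Option Int) = some j))
        = PySem.List.pyRange a i 1 ++ PySem.List.pyRange (i + 1) b 1 := by
    intro k
    induction k with
    | zero =>
      intro a hk ha hb
      have hai : a = i := by omega
      subst hai
      rw [PySem.List.pyRange_one_cons hb, PySem.List.pyRange_one_eq_nil (le_refl a)]
      simp only [List.filter_cons, decide_true, Bool.not_true, List.nil_append]
      exact pv_filter_range_id a b (a + 1) (by omega)
    | succ m ih =>
      intro a hk ha hb
      have hab : a < b := by omega
      rw [PySem.List.pyRange_one_cons hab]
      have hne : ¬ ((some i : Option Int) = some a) := by simp; omega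
      simp only [List.filter_cons, hne, decide_false, Bool.not_false, if_true]
      rw [ih (a + 1) (by omega) (by omega) hb, PySem.List.pyRange_one_cons (show a < i by omega)]
      simp
  intro a ha hb; exact H (i - a).toNat a rfl ha hb

-- the walk along a full consecutive range is the sum of consecutive-segment distances
theorem pv_adj_range (points : List (Int × Int)) (b : Int) :
    ∀ (a : Int), pvAdj points a (PySem.List.pyRange (a + 1) b 1)
      = ((PySem.List.pyRange a (b - 1) 1).map
          (fun j => pvDd points j (j + 1))).sum := by
  have H : ∀ (k : Nat) (a : Int), (b - 1 - a).toNat = k →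
      pvAdj points a (PySem.List.pyRange (a + 1) b 1)
        = ((PySem.List.pyRange a (b - 1) 1).map (fun j => pvDd points j (j + 1))).sum := by
    intro k
    induction k with
    | zero =>
      intro a hk
      rw [PySem.List.pyRange_one_eq_nil (show b ≤ a + 1 by omega),
        PySem.List.pyRange_one_eq_nil (show b - 1 ≤ a by omega)]
      rfl
    | succ m ih =>
      intro a hk
      rw [PySem.List.pyRange_one_cons (show a + 1 < b by omega),
        PySem.List.pyRange_one_cons (show a < b - 1 by omega)]
      simp only [pvAdj, List.map_cons, List.sum_cons]
      rw [show a + 1 + 1 = (a + 1) + 1 from rfl, ih (a + 1) (by omega)]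
  intro a; exact H (b - 1 - a).toNat a rfl

-- splitting a walk at an intermediate stop
theorem pv_adj_append (points : List (Int × Int)) (q : Int) (M : List Int) :
    ∀ (A : List Int) (p : Int),
      pvAdj points p (A ++ q :: M) = pvAdj points p (A ++ [q]) + pvAdj points q M := by
  intro A
  induction A with
  | nil => intro p; simp [pvAdj]
  | cons a t ih => intro p; simp [pvAdj, ih]; ring

-- the walk along a consecutive range with one extra final stop c
theorem pv_adj_range_snoc (points : List (Int × Int)) (b c : Int) :
    ∀ (a : Int), a ≤ b - 1 →
      pvAdj points a (PySem.List.pyRange (a + 1) b 1 ++ [c])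
        = ((PySem.List.pyRange a (b - 1) 1).map (fun j => pvDd points j (j + 1))).sum
          + pvDd points (b - 1) c := by
  have H : ∀ (k : Nat) (a : Int), (b - 1 - a).toNat = k → a ≤ b - 1 →
      pvAdj points a (PySem.List.pyRange (a + 1) b 1 ++ [c])
        = ((PySem.List.pyRange a (b - 1) 1).map (fun j => pvDd points j (j + 1))).sum
          + pvDd points (b - 1) c := by
    intro k
    induction k with
    | zero =>
      intro a hk ha
      have hab : a = b - 1 := by omega
      rw [PySem.List.pyRange_one_eq_nil (show b ≤ a + 1 by omega),
        PySem.List.pyRange_one_eq_nil (show b - 1 ≤ a by omega)]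
      simp [pvAdj, hab]
    | succ m ih =>
      intro a hk ha
      rw [PySem.List.pyRange_one_cons (show a + 1 < b by omega),
        PySem.List.pyRange_one_cons (show a < b - 1 by omega)]
      simp only [pvAdj, List.map_cons, List.sum_cons, List.cons_append]
      rw [ih (a + 1) (by omega) (by omega)]
      ring
  intro a ha; exact H (b - 1 - a).toNat a rfl ha

-- the unskipped walk equals A's total
theorem pv_walk_none (n : Int) (points : List (Int × Int)) :
    pvWalk n points none
      = ((PySem.List.pyRange 0 (n - 1) 1).map
          (fun i => pvMd (pvPt points i) (pvPt points (i + 1)))).sum := by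
  unfold pvWalk
  rw [pv_fold_filter]
  have hfil : (PySem.List.pyRange 0 n 1).filter
      (fun j => !decide ((none : Option Int) = some j)) = PySem.List.pyRange 0 n 1 := by
    simp
  rw [hfil]
  by_cases hn : 0 < n
  · rw [PySem.List.pyRange_one_cons hn]
    simp only [List.foldl_cons, pvStep]
    rw [pv_fold_adj]
    have := pv_adj_range points n 0
    simpa [pvDd] using this
  · rw [PySem.List.pyRange_one_eq_nil (by omega),
      PySem.List.pyRange_one_eq_nil (by omega)]
    rfl

-- the walk skipping interior checkpoint i equals the total minus the saving at i
theorem pv_walk_skip (n : Int) (points : List (Int × Int)) (i : Int)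
    (h1 : 1 ≤ i) (h2 : i < n - 1) :
    pvWalk n points (some i)
      = ((PySem.List.pyRange 0 (n - 1) 1).map
          (fun j => pvMd (pvPt points j) (pvPt points (j + 1)))).sum
        - ((pvMd (pvPt points (i - 1)) (pvPt points i)
            + pvMd (pvPt points i) (pvPt points (i + 1)))
          - pvMd (pvPt points (i - 1)) (pvPt points (i + 1))) := by
  unfold pvWalk
  rw [pv_fold_filter, pv_filter_range_split i n 0 (by omega) (by omega)]
  -- peel the leading 0 and the leading i+1 of the second range
  rw [PySem.List.pyRange_one_cons (show (0 : Int) < i by omega),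
    PySem.List.pyRange_one_cons (show i + 1 < n by omega)]
  simp only [List.cons_append, List.foldl_cons, pvStep]
  rw [pv_fold_adj]
  rw [pv_adj_append points (i + 1) (PySem.List.pyRange (i + 1 + 1) n 1) (PySem.List.pyRange (0 + 1) i 1) 0]
  rw [show (0 : Int) + 1 = 0 + 1 from rfl]
  rw [pv_adj_range_snoc points i (i + 1) 0 (by omega)]
  rw [show i + 1 + 1 = (i + 1) + 1 from rfl, pv_adj_range points n (i + 1)]
  -- split A's total sum at i-1 and peel two terms
  have hsplit : PySem.List.pyRange 0 (n - 1) 1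
      = PySem.List.pyRange 0 (i - 1) 1 ++ PySem.List.pyRange (i - 1) (n - 1) 1 :=
    PySem.List.pyRange_one_append 0 (i - 1) (n - 1) (by omega) (by omega)
  rw [hsplit, PySem.List.pyRange_one_cons (show i - 1 < n - 1 by omega),
    PySem.List.pyRange_one_cons (show i - 1 + 1 < n - 1 by omega)]
  simp only [List.map_append, List.sum_append, List.map_cons, List.sum_cons]
  have e1 : i - 1 + 1 = i := by omega
  rw [e1]
  simp only [pvDd]
  ring

-- running minimum of (total - g i) versus running maximum of g i
theorem pv_min_max_fold (L : List Int) (g : Int → Int) (total : Int) :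
    ∀ m : Int, L.foldl (fun b i => min b (total - g i)) (total - m)
      = total - L.foldl (fun m' i => max m' (g i)) m := by
  induction L with
  | nil => intro m; rfl
  | cons a t ih =>
    intro m
    have h : min (total - m) (total - g a) = total - max m (g a) := by omega
    simpa [h] using ih (max m (g a))

theorem solve_eq_alt (n : Int) (points : List (Int × Int)) :
    solve n points = solve_alt n points := by
  unfold solve solve_alt
  simp only []
  rw [List.foldl_map, pv_walk_none]
  set total := ((PySem.List.pyRange 0 (n - 1) 1).map
    (fun i => pvMd (pvPt points i) (pvPt points (i + 1)))).sum with htotal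
  have hcongr : (PySem.List.pyRange 1 (n - 1) 1).foldl
      (fun best i => min best (pvWalk n points (some i))) total
      = (PySem.List.pyRange 1 (n - 1) 1).foldl
      (fun best i => min best (total - ((pvMd (pvPt points (i - 1)) (pvPt points i)
          + pvMd (pvPt points i) (pvPt points (i + 1)))
        - pvMd (pvPt points (i - 1)) (pvPt points (i + 1))))) total := by
    apply PySem.List.foldl_congr_mem
    intro acc x hx
    rw [PySem.List.mem_pyRange_one] at hx
    rw [pv_walk_skip n points x hx.1 hx.2, ← htotal]
  rw [hcongr]
  have h := pv_min_max_fold (PySem.List.pyRange 1 (n - 1) 1)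
    (fun i => (pvMd (pvPt points (i - 1)) (pvPt points i)
        + pvMd (pvPt points i) (pvPt points (i + 1)))
      - pvMd (pvPt points (i - 1)) (pvPt points (i + 1))) total 0
  simp only [sub_zero] at h
  rw [h]

-- ===== VERDICT (by name: the statement is the Claim_ definition above) =====
theorem solve_spec : Claim_equal_solve := by
  intro n points _ _
  unfold Spec_solve
  exact solve_eq_alt n points
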